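-- pv_equiv track=rewrite | github.com/martinruefenacht/fennel | old/recursive_multiplying.py | _aggregate_factors
-- ===== SOURCE A (Python) =====
-- from typing import Iterable, Optional, Any, Tuple
--
-- def _aggregate_factors(factors: Iterable[int],
--                        threshold: int
--                        ) -> Iterable[int]:
--     """
--     """
--
--     if len(factors) <= 1:
--         return factors
--
--     factors = sorted(factors)
--
--     prod = factors[0] * factors[1]
--     if prod > threshold:
--         return factors
--
--     return _aggregate_factors([prod] + factors[2:], threshold)
-- ===== SOURCE B (Python) =====
-- def _merge_insert(p, xs):
--     # insert p into the already-sorted list xs, keeping it sorted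
--     out = []
--     i = 0
--     while i < len(xs) and xs[i] < p:
--         out.append(xs[i])
--         i += 1
--     out.append(p)
--     out.extend(xs[i:])
--     return out
--
--
-- def _aggregate_factors(factors, threshold):
--     if len(factors) <= 1:
--         return factors
--     fs = sorted(factors)
--     while len(fs) >= 2:
--         p = fs[0] * fs[1]
--         if p > threshold:
--             break
--         fs = _merge_insert(p, fs[2:])
--     return fs
-- ===== Notes on version B (the rewrite author's own statement) =====
-- stated objective: alternative
-- what changed: B sorts once and then runs an iterative merge loop that re-inserts each product into the still-sorted tail by a single linear insertion, instead of A's recursion that re-sorts the whole list on every merge step.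
import Mathlib
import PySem

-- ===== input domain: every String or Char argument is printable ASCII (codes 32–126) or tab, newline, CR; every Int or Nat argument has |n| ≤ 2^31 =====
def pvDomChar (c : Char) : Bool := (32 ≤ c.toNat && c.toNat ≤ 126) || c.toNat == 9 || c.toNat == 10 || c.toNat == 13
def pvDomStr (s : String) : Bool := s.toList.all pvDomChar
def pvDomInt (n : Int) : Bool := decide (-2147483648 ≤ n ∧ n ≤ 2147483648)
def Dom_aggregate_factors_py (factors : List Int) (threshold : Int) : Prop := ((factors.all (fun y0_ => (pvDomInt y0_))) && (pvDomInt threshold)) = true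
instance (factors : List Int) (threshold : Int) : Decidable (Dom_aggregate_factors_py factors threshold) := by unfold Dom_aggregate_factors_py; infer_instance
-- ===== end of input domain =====

-- ===== PORT A =====
-- port of A: recursive greedy merge, re-sorting the whole list on every step
def aggregate_factors_py (factors : List Int) (threshold : Int) : List Int :=
  if factors.length ≤ 1 then factors
  else
    match h : PySem.List.sorted factors (fun x => x) with
    | a :: b :: rest =>
        if a * b > threshold then a :: b :: rest
        else aggregate_factors_py (a * b :: rest) threshold
    | s => s
termination_by factors.length
decreasing_by
  have := PySem.List.length_sorted factors (fun x => x) false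
  rw [h] at this; simp at this ⊢; omega

-- ===== PORT B =====
-- B sorts once, then iteratively merges the two smallest, re-inserting the
-- product into the still-sorted tail by a single linear insertion (Source B's _merge_insert).
def mergeInsert (p : Int) : List Int → List Int
  | [] => [p]
  | x :: xs => if x < p then x :: mergeInsert p xs else p :: x :: xs

theorem length_mergeInsert (p : Int) (xs : List Int) :
    (mergeInsert p xs).length = xs.length + 1 := by
  induction xs with
  | nil => rfl
  | cons x xs ih => simp only [mergeInsert]; split <;> simp [ih]

def aggLoop (threshold : Int) (fs : List Int) : List Int :=
  match fs with
  | [] => []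
  | [x] => [x]
  | a :: b :: rest =>
      if a * b > threshold then a :: b :: rest
      else aggLoop threshold (mergeInsert (a * b) rest)
termination_by fs.length
decreasing_by simp [length_mergeInsert]

def aggregate_factors_py_alt (factors : List Int) (threshold : Int) : List Int :=
  if factors.length ≤ 1 then factors
  else aggLoop threshold (PySem.List.sorted factors (fun x => x))

-- ===== PRECONDITION & SPEC =====
def Spec_aggregate_factors_py (factors : List Int) (threshold : Int) (out : List Int) : Prop := out = aggregate_factors_py_alt factors threshold
instance (factors : List Int) (threshold : Int) (out : List Int) : Decidable (Spec_aggregate_factors_py factors threshold out) := by unfold Spec_aggregate_factors_py; infer_instance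

-- ===== CLAIM (what is proved, stated in full; the proofs are below) =====
def Claim_equal_aggregate_factors_py : Prop := ∀ (factors : List Int) (threshold : Int), Dom_aggregate_factors_py factors threshold → Spec_aggregate_factors_py factors threshold (aggregate_factors_py factors threshold)

-- ===== LEMMAS AND PROOFS =====

theorem mergeInsert_perm (p : Int) (xs : List Int) :
    (mergeInsert p xs).Perm (p :: xs) := by
  induction xs with
  | nil => rfl
  | cons x xs ih =>
    simp only [mergeInsert]
    split
    · exact (ih.cons x).trans (List.Perm.swap p x xs)
    · rfl

theorem mergeInsert_pairwise (p : Int) (xs : List Int)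
    (h : xs.Pairwise (· ≤ ·)) : (mergeInsert p xs).Pairwise (· ≤ ·) := by
  induction xs with
  | nil => simp [mergeInsert]
  | cons x xs ih =>
    rcases List.pairwise_cons.mp h with ⟨hx, hxs⟩
    simp only [mergeInsert]
    split
    · rename_i hlt
      refine List.pairwise_cons.mpr ⟨?_, ih hxs⟩
      intro y hy
      rcases List.mem_cons.mp ((mergeInsert_perm p xs).mem_iff.mp hy) with rfl | hy
      · exact le_of_lt hlt
      · exact hx y hy
    · rename_i hge
      refine List.pairwise_cons.mpr ⟨?_, h⟩
      intro y hy
      rcases List.mem_cons.mp hy with rfl | hy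
      · omega
      · exact le_trans (by omega) (hx y hy)

theorem sorted_cons_eq_mergeInsert (p : Int) (xs : List Int)
    (h : xs.Pairwise (· ≤ ·)) :
    PySem.List.sorted (p :: xs) (fun x => x) = mergeInsert p xs :=
  PySem.List.sorted_id_eq_of_perm_of_pairwise _ _
    (mergeInsert_perm p xs) (mergeInsert_pairwise p xs h)

-- A applied to any list equals A applied to its sorted rearrangement
theorem aggA_eq_sorted (factors : List Int) (threshold : Int) :
    aggregate_factors_py factors threshold
      = aggregate_factors_py (PySem.List.sorted factors (fun x => x)) threshold := by
  have hlen := PySem.List.length_sorted factors (fun x => x) false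
  by_cases hle : factors.length ≤ 1
  · have hp : factors.Pairwise (fun a b => (a : Int) ≤ b) := by
      match factors, hle with
      | [], _ => simp
      | [x], _ => simp
    rw [PySem.List.sorted_eq_self_of_pairwise _ _ hp]
  · rw [aggregate_factors_py, aggregate_factors_py]
    simp only [hle, hlen, if_false]
    rw [PySem.List.sorted_sorted]

-- on a sorted list, A equals B's loop
theorem aggA_sorted_eq_loop (n : Nat) (fs : List Int) (threshold : Int)
    (hn : fs.length ≤ n) (hs : fs.Pairwise (· ≤ ·)) :
    aggregate_factors_py fs threshold = aggLoop threshold fs := by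
  induction n generalizing fs with
  | zero =>
    have : fs = [] := List.length_eq_zero_iff.mp (by omega)
    subst this; rw [aggregate_factors_py, aggLoop]; simp
  | succ n ih =>
    match fs, hs with
    | [], _ => rw [aggregate_factors_py, aggLoop]; simp
    | [x], _ => rw [aggregate_factors_py, aggLoop]; simp
    | a :: b :: rest, hs =>
      have htail : (b :: rest).Pairwise (fun x y => (x : Int) ≤ y) :=
        (List.pairwise_cons.mp hs).2
      have hrest : rest.Pairwise (fun x y => (x : Int) ≤ y) :=
        (List.pairwise_cons.mp htail).2
      rw [aggregate_factors_py]
      rw [PySem.List.sorted_eq_self_of_pairwise _ _ hs]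
      simp only [List.length_cons, if_neg (by omega : ¬ rest.length + 1 + 1 ≤ 1)]
      rw [aggLoop]
      by_cases hgt : a * b > threshold
      · simp [hgt]
      · simp only [hgt, if_false]
        rw [aggA_eq_sorted, sorted_cons_eq_mergeInsert _ _ hrest]
        apply ih
        · have := length_mergeInsert (a * b) rest
          simp at hn ⊢; omega
        · exact mergeInsert_pairwise _ _ hrest

-- ===== VERDICT (by name: the statement is the Claim_ definition above) =====
theorem aggregate_factors_py_spec : Claim_equal_aggregate_factors_py := by
  intro factors threshold _
  unfold Spec_aggregate_factors_py aggregate_factors_py_alt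
  by_cases hle : factors.length ≤ 1
  · simp only [hle, if_true]
    rw [aggregate_factors_py]
    simp [hle]
  · simp only [hle, if_false]
    rw [aggA_eq_sorted]
    exact aggA_sorted_eq_loop factors.length _ threshold
      (by rw [PySem.List.length_sorted]) (PySem.List.sorted_pairwise _ _)
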